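-- pv_equiv track=rewrite | github.com/Park-Young-Hun/Algorithm | Python/BaekJoon/보석도둑_1202.py | solution
-- ===== SOURCE A (Python) =====
-- from bisect import bisect_left
--
-- class Gem:
--     def __init__(self, weight, value):
--         self.weight = weight
--         self.value = value
--
-- def solution(gems, bags):
--     answer = 0
--     is_used = [False] * (len(bags) + 1)
--
--     for i in range(len(gems)):
--         gems[i] = Gem(gems[i][0], gems[i][1])
--
--     gems.sort(key=lambda x: (-x.value, x.weight))
--     bags.sort()
--
--     for gem in gems:
--         target_index = bisect_left(bags, gem.weight)
--
--         while is_used[target_index]: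
--             target_index += 1
--
--         if target_index >= len(bags):
--             continue
--
--         is_used[target_index] = True
--         answer += gem.value
--
--     return answer
-- ===== SOURCE B (Python) =====
-- from bisect import bisect_left
--
-- def solution(gems, bags):
--     # Same greedy (gems by descending value, smallest fitting bag first), but the
--     # free bags are kept as a shrinking sorted list: one bisect + pop per gem,
--     # no used-flag array and no linear skip scan over used slots.
--     order = sorted(gems, key=lambda g: (-g[1], g[0]))
--     free = sorted(bags)
--     answer = 0
--     for g in order:
--         j = bisect_left(free, g[0])
--         if j < len(free):
--             free.pop(j)
--             answer += g[1]
--     return answer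
-- ===== Notes on version B (the rewrite author's own statement) =====
-- stated objective: simpler
-- what changed: Instead of a fixed used-flag array with bisect plus a linear while-scan past used slots, B keeps the free bags as a shrinking sorted list and does one bisect and one pop per gem, with no flag bookkeeping.
import Mathlib
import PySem

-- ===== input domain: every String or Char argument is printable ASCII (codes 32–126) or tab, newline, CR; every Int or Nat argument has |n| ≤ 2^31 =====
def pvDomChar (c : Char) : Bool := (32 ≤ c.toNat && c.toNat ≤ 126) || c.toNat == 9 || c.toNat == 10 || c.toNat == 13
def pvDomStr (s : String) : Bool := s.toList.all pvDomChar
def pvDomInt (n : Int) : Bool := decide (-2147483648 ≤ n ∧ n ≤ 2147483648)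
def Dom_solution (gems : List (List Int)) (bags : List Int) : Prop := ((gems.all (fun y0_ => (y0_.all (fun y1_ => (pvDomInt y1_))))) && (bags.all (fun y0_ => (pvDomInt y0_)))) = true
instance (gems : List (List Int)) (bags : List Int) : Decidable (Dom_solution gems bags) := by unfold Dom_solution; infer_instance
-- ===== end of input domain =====

-- B replaces A's used-flag array + bisect + linear skip-scan by a shrinking sorted
-- free-bag list with one bisect and one pop per gem (objective: simpler).
-- Note: Python A mutates its arguments (sorts them in place, replaces gems' inner
-- lists by Gem objects); B does not. The equivalence proved here is about the
-- RETURN value only.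

-- ===== PORT A =====
-- Gem(weight, value) is modeled as the pair (weight, value).
-- the `while is_used[target_index]: target_index += 1` loop of A
def skipUsed (used : List Bool) (i : Nat) : Nat :=
  if h : used.getD i false = true then skipUsed used (i + 1) else i
termination_by used.length - i
decreasing_by
  have hi : i < used.length := by
    by_contra hi
    rw [List.getD_eq_default _ _ (by omega)] at h
    exact Bool.false_ne_true h
  omega

def solution (gems : List (List Int)) (bags : List Int) : Int :=
  -- answer = 0; is_used = [False] * (len(bags) + 1)
  let isUsed : List Bool := List.replicate (bags.length + 1) false
  -- gems[i] = Gem(gems[i][0], gems[i][1]); the `.getD 0` default is unreachable under Pre_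
  let gs : List (Int × Int) :=
    gems.map (fun g => ((PySem.List.pyGet? g 0).getD 0, (PySem.List.pyGet? g 1).getD 0))
  -- gems.sort(key=lambda x: (-x.value, x.weight)); bags.sort()
  let gsS := PySem.List.sorted2 gs (fun x => -x.2) (fun x => x.1)
  let bagsS := PySem.List.sorted bags (fun x => x)
  -- the for-loop threading (answer, is_used)
  let r := gsS.foldl (fun (st : Int × List Bool) gem =>
      let t := skipUsed st.2 (PySem.List.bisectLeft bagsS gem.1)
      if bagsS.length ≤ t then st
      else (st.1 + gem.2, st.2.set t true)) (0, isUsed)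
  r.1

-- ===== PORT B =====
def solution_alt (gems : List (List Int)) (bags : List Int) : Int :=
  -- order = sorted(gems, key=lambda g: (-g[1], g[0])); free = sorted(bags)
  let order := PySem.List.sorted2 gems
      (fun g => -((PySem.List.pyGet? g 1).getD 0)) (fun g => (PySem.List.pyGet? g 0).getD 0)
  let free0 := PySem.List.sorted bags (fun x => x)
  -- the for-loop threading (answer, free); free.pop(j) with j < len(free) is eraseIdx j
  let r := order.foldl (fun (st : Int × List Int) g =>
      let j := PySem.List.bisectLeft st.2 ((PySem.List.pyGet? g 0).getD 0)
      if j < st.2.length then (st.1 + (PySem.List.pyGet? g 1).getD 0, st.2.eraseIdx j)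
      else st) (0, free0)
  r.1

-- ===== PRECONDITION & SPEC =====
-- Pre_ excludes exactly the inputs where Python A raises IndexError: some gem with
-- fewer than 2 entries (gems[i][0] / gems[i][1] out of range). B raises there too.
def Pre_solution (gems : List (List Int)) (bags : List Int) : Prop :=
  ∀ g ∈ gems, 2 ≤ g.length
instance (gems : List (List Int)) (bags : List Int) : Decidable (Pre_solution gems bags) := by
  unfold Pre_solution; infer_instance
def pvWitness_solution : List (List Int) × List Int := ([[2, 3], [1, 5], [2, 4]], [1, 2])

def Spec_solution (gems : List (List Int)) (bags : List Int) (out : Int) : Prop := out = solution_alt gems bags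
instance (gems : List (List Int)) (bags : List Int) (out : Int) : Decidable (Spec_solution gems bags out) := by unfold Spec_solution; infer_instance

-- ===== CLAIM (what is proved, stated in full; the proofs are below) =====
def Claim_equal_solution : Prop := ∀ (gems : List (List Int)) (bags : List Int), Dom_solution gems bags → Pre_solution gems bags → Spec_solution gems bags (solution gems bags)

-- ===== LEMMAS AND PROOFS =====

lemma skipUsed_cons_succ (u : Bool) (m : List Bool) (i : Nat) :
    skipUsed (u :: m) (i + 1) = skipUsed m i + 1 := by
  conv_lhs => rw [skipUsed]
  conv_rhs => rw [skipUsed]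
  have hg : (u :: m).getD (i + 1) false = m.getD i false := by
    simp [List.getD]
  rw [hg]
  split_ifs with h
  · exact skipUsed_cons_succ u m (i + 1)
  · rfl
termination_by m.length - i
decreasing_by
  rename_i h
  have hi : i < m.length := by
    by_contra hi
    rw [List.getD_eq_default _ _ (by omega)] at h
    exact Bool.false_ne_true h
  omega

lemma skipUsed_cons_zero_true (m : List Bool) :
    skipUsed (true :: m) 0 = skipUsed m 0 + 1 := by
  rw [skipUsed]; simp [List.getD, skipUsed_cons_succ]

lemma skipUsed_cons_zero_false (m : List Bool) :
    skipUsed (false :: m) 0 = 0 := by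
  rw [skipUsed]; simp [List.getD]

lemma bl_eq_of (xs : List Int) (x : Int) (h : List.Pairwise (· ≤ ·) xs) (n : Nat)
    (hn : n ≤ xs.length)
    (h1 : ∀ (j : Nat) (hj : j < xs.length), j < n → xs[j] < x)
    (h2 : ∀ (j : Nat) (hj : j < xs.length), n ≤ j → x ≤ xs[j]) :
    PySem.List.bisectLeft xs x = n := by
  obtain ⟨hle, hlt, hge⟩ := PySem.List.bisectLeft_spec xs x h
  set b := PySem.List.bisectLeft xs x with hb
  rcases Nat.lt_trichotomy b n with hbn | hbn | hbn
  · have hblen : b < xs.length := lt_of_lt_of_le hbn hn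
    have := h1 b hblen hbn
    have := hge b hblen (le_refl b)
    omega
  · exact hbn
  · have hnlen : n < xs.length := lt_of_lt_of_le hbn hle
    have := hlt n hnlen hbn
    have := h2 n hnlen (le_refl n)
    omega

lemma bl_cons_lt (c : Int) (B : List Int) (x : Int)
    (h : List.Pairwise (· ≤ ·) (c :: B)) (hc : c < x) :
    PySem.List.bisectLeft (c :: B) x = PySem.List.bisectLeft B x + 1 := by
  have htail : List.Pairwise (· ≤ ·) B := h.of_cons
  obtain ⟨hle, hlt, hge⟩ := PySem.List.bisectLeft_spec B x htail
  apply bl_eq_of _ _ h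
  · simpa using Nat.succ_le_succ hle
  · intro j hj hjn
    cases j with
    | zero => simpa using hc
    | succ j' =>
      simp only [List.getElem_cons_succ]
      exact hlt j' (by simpa using hj) (by omega)
  · intro j hj hjn
    cases j with
    | zero => omega
    | succ j' =>
      simp only [List.getElem_cons_succ]
      exact hge j' (by simpa using hj) (by omega)

lemma bl_eq_zero_of (B : List Int) (x : Int) (h : List.Pairwise (· ≤ ·) B)
    (hall : ∀ b ∈ B, x ≤ b) : PySem.List.bisectLeft B x = 0 := by
  apply bl_eq_of _ _ h
  · omega
  · omega
  · intro j hj _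
    exact hall _ (List.getElem_mem hj)

def select : List Int → List Bool → List Int
  | c :: B, true :: m => select B m
  | c :: B, false :: m => c :: select B m
  | _, _ => []

lemma select_replicate (B : List Int) : select B (List.replicate B.length false) = B := by
  induction B with
  | nil => rfl
  | cons c B ih => simp [select, List.replicate, ih]

lemma select_sublist (B : List Int) (m : List Bool) : (select B m).Sublist B := by
  induction B generalizing m with
  | nil => cases m <;> simp [select]
  | cons c B ih =>
    cases m with
    | nil => simp [select]
    | cons u m =>
      cases u with
      | false => simpa [select] using (ih m).cons₂ c
      | true => simpa [select] using (ih m).cons c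

lemma step_core (x : Int) (B : List Int) (m : List Bool)
    (h : List.Pairwise (· ≤ ·) B) (hm : m.length = B.length) :
    (B.length ≤ skipUsed (m ++ [false]) (PySem.List.bisectLeft B x) ↔
      (select B m).length ≤ PySem.List.bisectLeft (select B m) x)
    ∧ (skipUsed (m ++ [false]) (PySem.List.bisectLeft B x) < B.length →
        select B (m.set (skipUsed (m ++ [false]) (PySem.List.bisectLeft B x)) true)
          = (select B m).eraseIdx (PySem.List.bisectLeft (select B m) x)) := by
  induction B generalizing m with
  | nil =>
    have hm0 : m = [] := List.eq_nil_of_length_eq_zero hm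
    subst hm0
    rw [bl_eq_zero_of ([] : List Int) x (by simp) (by simp)]
    simp only [List.nil_append, skipUsed_cons_zero_false]
    constructor
    · simp [select, bl_eq_zero_of ([] : List Int) x (by simp) (by simp)]
    · intro ht; simp at ht
  | cons c B ih =>
    cases m with
    | nil => simp at hm
    | cons u m =>
      have hm' : m.length = B.length := by simpa using hm
      have htail : List.Pairwise (· ≤ ·) B := h.of_cons
      have hhead : ∀ b ∈ B, c ≤ b := fun b hb => List.rel_of_pairwise_cons h hb
      by_cases hx : c < x
      · rw [bl_cons_lt c B x h hx]
        have hshift : skipUsed ((u :: m) ++ [false]) (PySem.List.bisectLeft B x + 1)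
            = skipUsed (m ++ [false]) (PySem.List.bisectLeft B x) + 1 := by
          simpa using skipUsed_cons_succ u (m ++ [false]) (PySem.List.bisectLeft B x)
        rw [hshift]
        obtain ⟨ih1, ih2⟩ := ih m htail hm'
        cases u with
        | true =>
          simp only [select]
          simp only [List.length_cons]
          constructor
          · constructor
            · intro hle; exact ih1.mp (by omega)
            · intro hle; have := ih1.mpr hle; omega
          · intro ht
            simp only [List.set_cons_succ, select]
            exact ih2 (by omega)
        | false =>
          simp only [select]
          have hsel : List.Pairwise (· ≤ ·) (c :: select B m) := by
            have : (c :: select B m).Sublist (c :: B) := (select_sublist B m).cons₂ c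
            exact List.Pairwise.sublist this h
          rw [bl_cons_lt c (select B m) x hsel hx]
          constructor
          · simp only [List.length_cons]
            constructor
            · intro hle; have := ih1.mp (by omega); omega
            · intro hle; have := ih1.mpr (by omega); omega
          · intro ht
            simp only [List.length_cons] at ht
            simp only [List.set_cons_succ, select, List.eraseIdx_cons_succ]
            rw [ih2 (by omega)]
      · rw [not_lt] at hx
        have hall : ∀ b ∈ c :: B, x ≤ b := by
          intro b hb
          rcases List.mem_cons.mp hb with rfl | hb
          · exact hx
          · exact le_trans hx (hhead b hb)
        rw [bl_eq_zero_of (c :: B) x h hall]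
        cases u with
        | false =>
          simp only [List.cons_append]
          rw [skipUsed_cons_zero_false]
          simp only [select]
          have hsel : List.Pairwise (· ≤ ·) (c :: select B m) := by
            have : (c :: select B m).Sublist (c :: B) := (select_sublist B m).cons₂ c
            exact List.Pairwise.sublist this h
          rw [bl_eq_zero_of (c :: select B m) x hsel
            (fun b hb => hall b (((select_sublist B m).cons₂ c).mem hb))]
          constructor
          · simp
          · intro ht
            simp only [List.length_cons] at ht
            simp [select, List.eraseIdx]
        | true =>
          simp only [List.cons_append]
          rw [skipUsed_cons_zero_true]
          have hblB : PySem.List.bisectLeft B x = 0 :=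
            bl_eq_zero_of B x htail (fun b hb => le_trans hx (hhead b hb))
          obtain ⟨ih1, ih2⟩ := ih m htail hm'
          rw [hblB] at ih1 ih2
          simp only [select]
          simp only [List.length_cons]
          constructor
          · constructor
            · intro hle; exact ih1.mp (by omega)
            · intro hle; have := ih1.mpr hle; omega
          · intro ht
            simp only [List.set_cons_succ, select]
            exact ih2 (by omega)

lemma fold_eq (bagsS : List Int) (hs : List.Pairwise (· ≤ ·) bagsS) :
    ∀ (L : List (List Int)) (a : Int) (m : List Bool), m.length = bagsS.length →
    (L.foldl (fun (st : Int × List Bool) g =>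
        let t := skipUsed st.2 (PySem.List.bisectLeft bagsS ((PySem.List.pyGet? g 0).getD 0))
        if bagsS.length ≤ t then st
        else (st.1 + (PySem.List.pyGet? g 1).getD 0, st.2.set t true)) (a, m ++ [false])).1
    = (L.foldl (fun (st : Int × List Int) g =>
        let j := PySem.List.bisectLeft st.2 ((PySem.List.pyGet? g 0).getD 0)
        if j < st.2.length then (st.1 + (PySem.List.pyGet? g 1).getD 0, st.2.eraseIdx j)
        else st) (a, select bagsS m)).1 := by
  intro L
  induction L with
  | nil => intro a m hm; rfl
  | cons g L ih =>
    intro a m hm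
    simp only [List.foldl_cons]
    obtain ⟨sc1, sc2⟩ := step_core ((PySem.List.pyGet? g 0).getD 0) bagsS m hs hm
    set w := (PySem.List.pyGet? g 0).getD 0 with hw
    set t := skipUsed (m ++ [false]) (PySem.List.bisectLeft bagsS w) with hT
    set f := select bagsS m with hF
    set j := PySem.List.bisectLeft f w with hJ
    by_cases hc : bagsS.length ≤ t
    · rw [if_pos hc, if_neg (by have := sc1.mp hc; omega)]
      exact ih a m hm
    · rw [if_neg hc, if_pos (by by_contra hcon; exact hc (sc1.mpr (by omega)))]
      have ht : t < m.length := by omega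
      have hset : (m ++ [false]).set t true = m.set t true ++ [false] :=
        List.set_append_left _ _ ht
      rw [hset, ← sc2 (by omega)]
      exact ih _ (m.set t true) (by simpa using hm)

lemma insertBy_cons {α : Type} (b : α → α → Bool) (x y : α) (ys : List α) :
    PySem.List.insertBy b x (y :: ys) =
      if b x y then x :: y :: ys else y :: PySem.List.insertBy b x ys := rfl

lemma insertBy_map {α β : Type} (f : α → β) (b : β → β → Bool) (x : α) :
    ∀ l : List α, PySem.List.insertBy b (f x) (l.map f)
      = (PySem.List.insertBy (fun p q => b (f p) (f q)) x l).map f := by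
  intro l
  induction l with
  | nil => rfl
  | cons y ys ih =>
    simp only [List.map_cons, insertBy_cons]
    split_ifs with hb
    · simp
    · simp [ih]

lemma foldl_insertBy_map {α β : Type} (f : α → β) (b : β → β → Bool) :
    ∀ (L : List α) (M : List α),
      (L.map f).foldl (fun acc x => PySem.List.insertBy b x acc) (M.map f)
        = (L.foldl (fun acc x => PySem.List.insertBy (fun p q => b (f p) (f q)) x acc) M).map f := by
  intro L
  induction L with
  | nil => intro M; rfl
  | cons y ys ih =>
    intro M
    simp only [List.map_cons, List.foldl_cons]
    rw [insertBy_map, ih]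

lemma sorted2_map_conv (gems : List (List Int)) :
    PySem.List.sorted2 (gems.map (fun g => ((PySem.List.pyGet? g 0).getD 0, (PySem.List.pyGet? g 1).getD 0)))
        (fun x : Int × Int => -x.2) (fun x => x.1)
      = (PySem.List.sorted2 gems (fun g => -((PySem.List.pyGet? g 1).getD 0))
          (fun g => (PySem.List.pyGet? g 0).getD 0)).map
          (fun g => ((PySem.List.pyGet? g 0).getD 0, (PySem.List.pyGet? g 1).getD 0)) := by
  have h := foldl_insertBy_map
      (f := fun g : List Int => ((PySem.List.pyGet? g 0).getD 0, (PySem.List.pyGet? g 1).getD 0))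
      (b := fun a b : Int × Int => decide (-a.2 < -b.2) || (!decide (-b.2 < -a.2) && decide (a.1 < b.1)))
      gems []
  simpa [PySem.List.sorted2] using h

lemma solution_eq (gems : List (List Int)) (bags : List Int) :
    solution gems bags = solution_alt gems bags := by
  unfold solution solution_alt
  simp only [sorted2_map_conv, List.foldl_map]
  have hrep : List.replicate (bags.length + 1) false
      = List.replicate (PySem.List.sorted bags (fun x => x)).length false ++ [false] := by
    simp [PySem.List.length_sorted, List.replicate_succ']
  have hsel : PySem.List.sorted bags (fun x => x)
      = select (PySem.List.sorted bags (fun x => x))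
          (List.replicate (PySem.List.sorted bags (fun x => x)).length false) :=
    (select_replicate _).symm
  conv_lhs => rw [hrep]
  conv_rhs => rw [hsel]
  exact fold_eq _ (PySem.List.sorted_pairwise bags (fun x => x)) _ 0 _ (by simp)

-- ===== VERDICT (by name: the statement is the Claim_ definition above) =====
theorem solution_spec : Claim_equal_solution := by
  intro gems bags _ _
  unfold Spec_solution
  exact solution_eq gems bags
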